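-- pv_equiv track=rewrite | github.com/Afsheen-Aziz/EchoNews | backend/app.py | detect_echo_in_text
-- ===== SOURCE A (Python) =====
-- def detect_echo_in_text(text):
--     """Enhanced echo detection with various trigger phrases"""
--     text_lower = text.lower().strip()
--     echo_triggers = [
--         "echo",
--         "hey echo",
--         "echo news",
--         "echo please",
--         "stop and echo",
--         "interrupt echo"
--     ]
--
--     for trigger in echo_triggers:
--         if trigger in text_lower:
--             return True, text_lower.replace(trigger, "").strip()
--
--     return False, ""
-- ===== SOURCE B (Python) =====
-- def detect_echo_in_text(text):
--     """Enhanced echo detection: every trigger phrase contains "echo",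
--     so one substring check replaces the trigger-list loop."""
--     text_lower = text.lower().strip()
--     if "echo" in text_lower:
--         return True, text_lower.replace("echo", "").strip()
--     return False, ""
-- ===== Notes on version B (the rewrite author's own statement) =====
-- stated objective: simpler
-- what changed: Every trigger phrase in A's list contains the substring "echo", so A's loop always decides on its first element; B drops the trigger list and the loop and performs a single membership test and replace.
import Mathlib
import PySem

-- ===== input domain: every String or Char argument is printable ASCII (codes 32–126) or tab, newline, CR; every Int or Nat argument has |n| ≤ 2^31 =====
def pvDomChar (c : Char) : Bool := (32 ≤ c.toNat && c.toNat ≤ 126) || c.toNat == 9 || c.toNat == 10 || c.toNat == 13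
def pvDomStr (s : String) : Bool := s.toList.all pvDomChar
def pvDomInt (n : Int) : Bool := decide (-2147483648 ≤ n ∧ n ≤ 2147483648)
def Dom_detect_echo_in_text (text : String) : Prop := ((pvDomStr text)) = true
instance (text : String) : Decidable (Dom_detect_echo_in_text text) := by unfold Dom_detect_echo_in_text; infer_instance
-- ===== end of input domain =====

-- B drops A's trigger-list loop: every trigger contains "echo", so one membership test suffices.

-- ===== PORT A =====
-- the for-loop over echo_triggers: first matching trigger wins, else (False, "")
def detect_echo_loop (tl : String) : List String → Bool × String
  | [] => (false, "")
  | t :: ts =>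
    if PySem.Str.isIn t tl then (true, PySem.Str.strip (PySem.Str.replace tl t ""))
    else detect_echo_loop tl ts

def detect_echo_in_text (text : String) : Bool × String :=
  let text_lower := PySem.Str.strip (PySem.Str.lower text)
  let echo_triggers := ["echo", "hey echo", "echo news", "echo please", "stop and echo", "interrupt echo"]
  detect_echo_loop text_lower echo_triggers

-- ===== PORT B =====
def detect_echo_in_text_alt (text : String) : Bool × String :=
  let text_lower := PySem.Str.strip (PySem.Str.lower text)
  if PySem.Str.isIn "echo" text_lower then
    (true, PySem.Str.strip (PySem.Str.replace text_lower "echo" ""))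
  else (false, "")

-- ===== PRECONDITION & SPEC =====
def Spec_detect_echo_in_text (text : String) (out : Bool × String) : Prop := out = detect_echo_in_text_alt text
instance (text : String) (out : Bool × String) : Decidable (Spec_detect_echo_in_text text out) := by unfold Spec_detect_echo_in_text; infer_instance

-- ===== CLAIM (what is proved, stated in full; the proofs are below) =====
def Claim_equal_detect_echo_in_text : Prop := ∀ (text : String), Dom_detect_echo_in_text text → Spec_detect_echo_in_text text (detect_echo_in_text text)

-- ===== LEMMAS AND PROOFS =====

-- any trigger that has "echo" as a substring cannot occur in l when "echo" does not
theorem isIn_trigger_false (l sub t : List Char)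
    (hsub : sub <:+: t)
    (h : PySem.Chars.isIn sub l = false) : PySem.Chars.isIn t l = false := by
  rw [PySem.Chars.isIn_eq_false_iff] at h ⊢
  intro ht
  exact h (hsub.trans ht)

-- ===== VERDICT (by name: the statement is the Claim_ definition above) =====
theorem detect_echo_in_text_spec : Claim_equal_detect_echo_in_text := by
  intro text _
  unfold Spec_detect_echo_in_text detect_echo_in_text detect_echo_in_text_alt
  set tl := PySem.Str.strip (PySem.Str.lower text) with htl
  by_cases h : PySem.Chars.isIn ['e', 'c', 'h', 'o'] tl.toList = true
  · simp [detect_echo_loop, h]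
  · rw [Bool.not_eq_true] at h
    have h2 := isIn_trigger_false tl.toList _ ['h', 'e', 'y', ' ', 'e', 'c', 'h', 'o'] (by decide) h
    have h3 := isIn_trigger_false tl.toList _ ['e', 'c', 'h', 'o', ' ', 'n', 'e', 'w', 's'] (by decide) h
    have h4 := isIn_trigger_false tl.toList _ ['e', 'c', 'h', 'o', ' ', 'p', 'l', 'e', 'a', 's', 'e'] (by decide) h
    have h5 := isIn_trigger_false tl.toList _ ['s', 't', 'o', 'p', ' ', 'a', 'n', 'd', ' ', 'e', 'c', 'h', 'o'] (by decide) h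
    have h6 := isIn_trigger_false tl.toList _ ['i', 'n', 't', 'e', 'r', 'r', 'u', 'p', 't', ' ', 'e', 'c', 'h', 'o'] (by decide) h
    simp [detect_echo_loop, h, h2, h3, h4, h5, h6]
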